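-- pv_equiv track=rewrite | github.com/alvinchan2020/codeforces | 1607/C/main.py | solve
-- ===== SOURCE A (Python) =====
-- def solve(a):
--     a = sorted(a)
--     reduction = 0
--     minimas = []
--     for ai in a:
--         new_ai = ai - reduction
--         minimas.append(new_ai)
--         reduction += new_ai
--     return max(minimas)
-- ===== SOURCE B (Python) =====
-- def solve(a):
--     # Sortless: each element's candidate is its distance to its value-predecessor in a
--     # (0 for a repeated value, the value itself for the minimum); the answer is the
--     # largest candidate.
--     best = None
--     seen = set()
--     for v in a:
--         if v in seen:
--             g = 0
--         else:
--             seen.add(v)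
--             lower = [y for y in a if y < v]
--             g = v - max(lower) if lower else v
--         if best is None or g > best:
--             best = g
--     return best
-- ===== Notes on version B (the rewrite author's own statement) =====
-- stated objective: alternative
-- what changed: B drops the sort and the accumulated reduction/minimas list entirely: for each element it finds the largest strictly smaller value by a direct scan (0 for repeats, the value itself for the minimum) and keeps a running maximum of these distances; it trades the O(n log n) sort for an O(n^2) predecessor scan.
import Mathlib
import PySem

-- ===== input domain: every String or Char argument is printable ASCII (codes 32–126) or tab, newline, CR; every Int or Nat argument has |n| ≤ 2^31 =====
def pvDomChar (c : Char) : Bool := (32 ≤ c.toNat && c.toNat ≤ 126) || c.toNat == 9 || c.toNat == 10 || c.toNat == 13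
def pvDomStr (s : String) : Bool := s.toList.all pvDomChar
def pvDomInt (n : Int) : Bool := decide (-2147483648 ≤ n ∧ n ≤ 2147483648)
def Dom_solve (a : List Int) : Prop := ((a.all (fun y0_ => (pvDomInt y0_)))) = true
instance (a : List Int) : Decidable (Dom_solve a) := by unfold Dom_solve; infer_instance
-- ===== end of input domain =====

-- B drops A's sort and accumulated reduction/minimas list: for each element it scans the
-- list for the largest strictly smaller value (0 for a repeated value, the value itself
-- for the minimum) and keeps a running maximum of these distances (alternative algorithm).

-- ===== PORT A =====
def solve (a : List Int) : Int :=
  let s := PySem.List.sorted a (fun x => x) false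
  let st := s.foldl (fun (p : Int × List Int) ai =>
      let new_ai := ai - p.1
      (p.1 + new_ai, p.2 ++ [new_ai])) (0, [])
  match PySem.List.max? st.2 (fun x => x) with
  | some m => m
  | none => 0   -- a = []: max([]) raises ValueError; excluded by Pre_solve

-- ===== PORT B =====
-- helper: lower = [y for y in a if y < v]; v - max(lower) if lower else v
def gapB (a : List Int) (v : Int) : Int :=
  if a.filter (fun y => y < v) ≠ [] then
    match PySem.List.max? (a.filter (fun y => y < v)) (fun x => x) with
    | some m => v - m
    | none => v     -- unreachable: the filtered list is nonempty here
  else v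

-- one iteration of B's loop over state (best, seen)
def stepB (a : List Int) (p : Option Int × PySem.Set Int) (v : Int) :
    Option Int × PySem.Set Int :=
  let g : Int := if v ∈ p.2 then 0 else gapB a v
  let seen : PySem.Set Int := if v ∈ p.2 then p.2 else PySem.Set.add p.2 v
  (match p.1 with
   | none => some g
   | some b => if b < g then some g else some b, seen)

def solve_alt (a : List Int) : Int :=
  match (a.foldl (stepB a) (none, PySem.Set.empty)).1 with
  | some b => b
  | none => 0   -- a = []: Python B returns None (not an int); excluded by Pre_solve

-- ===== PRECONDITION & SPEC =====
-- On the empty list A raises ValueError (max of []) and B returns None; excluded.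
def Pre_solve (a : List Int) : Prop := a ≠ []
instance (a : List Int) : Decidable (Pre_solve a) := by unfold Pre_solve; infer_instance
def pvWitness_solve : List Int := [3, 1, 2]
def Spec_solve (a : List Int) (out : Int) : Prop := out = solve_alt a
instance (a : List Int) (out : Int) : Decidable (Spec_solve a out) := by unfold Spec_solve; infer_instance

-- ===== CLAIM (what is proved, stated in full; the proofs are below) =====
def Claim_equal_solve : Prop := ∀ (a : List Int), Dom_solve a → Pre_solve a → Spec_solve a (solve a)

-- ===== LEMMAS AND PROOFS =====

-- the list of consecutive differences A accumulates (first measured from p)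
def gaps (p : Int) : List Int → List Int
  | [] => []
  | x :: l => (x - p) :: gaps x l

-- the list of candidates B's loop feeds into its running maximum, with pre the
-- already-traversed elements
def cands (a : List Int) : List Int → List Int → List Int
  | _, [] => []
  | pre, v :: rest => (if v ∈ pre then 0 else gapB a v) :: cands a (v :: pre) rest

-- B's best-update as a function
def bump (b : Option Int) (g : Int) : Option Int :=
  match b with
  | none => some g
  | some x => if x < g then some g else some x

-- max of a nonempty list
def lmax : List Int → Int
  | [] => 0
  | x :: t => t.foldl max x

theorem lmax_mem (l : List Int) (h : l ≠ []) : lmax l ∈ l := by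
  cases l with
  | nil => exact absurd rfl h
  | cons x t =>
    simp only [lmax]
    rcases PySem.List.foldl_max_mem t x with h | h
    · rw [h]; exact List.mem_cons_self
    · exact List.mem_cons_of_mem _ h

theorem le_lmax (l : List Int) (x : Int) (hx : x ∈ l) : x ≤ lmax l := by
  cases l with
  | nil => cases hx
  | cons y t =>
    simp only [lmax]
    rcases List.mem_cons.mp hx with h | h
    · rw [h]; exact (PySem.List.le_foldl_max t y).1
    · exact (PySem.List.le_foldl_max t y).2 x h

theorem lmax_congr (l₁ l₂ : List Int) (h₁ : l₁ ≠ []) (h₂ : l₂ ≠ [])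
    (h : ∀ x, x ∈ l₁ ↔ x ∈ l₂) : lmax l₁ = lmax l₂ :=
  le_antisymm (le_lmax l₂ _ ((h _).mp (lmax_mem l₁ h₁)))
    (le_lmax l₁ _ ((h _).mpr (lmax_mem l₂ h₂)))

-- ---- A-side: solve a = lmax (gaps 0 (sorted a)) ----

theorem foldA_snd (l : List Int) (r : Int) (m : List Int) :
    (l.foldl (fun (p : Int × List Int) ai =>
      let new_ai := ai - p.1
      (p.1 + new_ai, p.2 ++ [new_ai])) (r, m)).2 = m ++ gaps r l := by
  induction l generalizing r m with
  | nil => simp [gaps]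
  | cons x l ih =>
    simp only [List.foldl_cons, gaps]
    have h1 : r + (x - r) = x := by ring
    rw [h1, ih]
    simp

theorem solveA_eq (a : List Int) (h : a ≠ []) :
    solve a = lmax (gaps 0 (PySem.List.sorted a (fun x => x) false)) := by
  unfold solve
  rcases hs : PySem.List.sorted a (fun x => x) false with _ | ⟨x, t⟩
  · exact absurd ((PySem.List.sorted_eq_nil_iff _ _ _).mp hs) h
  · dsimp only
    rw [foldA_snd]
    simp only [List.nil_append, gaps, lmax]
    rw [PySem.List.max?_id_cons]

-- ---- B-side: solve_alt a = lmax (cands a [] a) ----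

theorem bump_some (x g : Int) : bump (some x) g = some (max x g) := by
  simp only [bump, max_def]
  split_ifs <;> simp <;> omega

theorem foldl_bump_some (l : List Int) (x : Int) :
    l.foldl bump (some x) = some (l.foldl max x) := by
  induction l generalizing x with
  | nil => rfl
  | cons g l ih => rw [List.foldl_cons, bump_some, ih, List.foldl_cons]

theorem foldB (a : List Int) : ∀ (rest pre : List Int) (seen : PySem.Set Int)
    (best : Option Int), (∀ x : Int, x ∈ seen ↔ x ∈ pre) →
    (rest.foldl (stepB a) (best, seen)).1 = (cands a pre rest).foldl bump best := by
  intro rest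
  induction rest with
  | nil => intro pre seen best _; simp [cands]
  | cons v rest' ih =>
    intro pre seen best hmem
    simp only [List.foldl_cons, cands]
    by_cases hv : v ∈ pre
    · have hv' : v ∈ seen := (hmem v).mpr hv
      rw [if_pos hv]
      have hstep : stepB a (best, seen) v = (bump best 0, seen) := by
        simp [stepB, bump, if_pos hv']
      rw [hstep]
      refine ih (v :: pre) seen (bump best 0) ?_
      intro x
      rw [List.mem_cons, hmem x]
      constructor
      · exact Or.inr
      · rintro (rfl | h)
        · exact hv
        · exact h
    · have hv' : v ∉ seen := fun h => hv ((hmem v).mp h)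
      rw [if_neg hv]
      have hstep : stepB a (best, seen) v = (bump best (gapB a v), PySem.Set.add seen v) := by
        simp [stepB, bump, if_neg hv']
      rw [hstep]
      refine ih (v :: pre) (PySem.Set.add seen v) (bump best (gapB a v)) ?_
      intro x
      rw [PySem.Set.mem_add, List.mem_cons, hmem x]
      tauto

theorem solveB_eq (a : List Int) (h : a ≠ []) : solve_alt a = lmax (cands a [] a) := by
  unfold solve_alt
  rw [foldB a a [] PySem.Set.empty none (by intro x; simp [PySem.Set.empty])]
  cases hc : cands a [] a with
  | nil =>
    cases a with
    | nil => exact absurd rfl h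
    | cons x t => simp [cands] at hc
  | cons c cs =>
    simp only [List.foldl_cons]
    have hb : bump none c = some c := rfl
    rw [hb, foldl_bump_some]
    simp [lmax]

-- ---- membership in cands ----

theorem mem_cands_of_mem (a : List Int) : ∀ (rest pre : List Int) (v : Int),
    v ∈ rest → v ∉ pre → gapB a v ∈ cands a pre rest := by
  intro rest
  induction rest with
  | nil => intro pre v hv _; cases hv
  | cons x rest' ih =>
    intro pre v hv hvp
    by_cases hvx : v = x
    · subst hvx
      simp only [cands]; rw [if_neg hvp]
      exact List.mem_cons_self
    · have hv' : v ∈ rest' := by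
        rcases List.mem_cons.mp hv with h | h
        · exact absurd h hvx
        · exact h
      exact List.mem_cons_of_mem _
        (ih (x :: pre) v hv' (by simp only [List.mem_cons]; tauto))

theorem mem_cands_zero (a : List Int) : ∀ (rest pre : List Int) (v : Int),
    v ∈ pre → v ∈ rest → (0 : Int) ∈ cands a pre rest := by
  intro rest
  induction rest with
  | nil => intro pre v _ hv; cases hv
  | cons x rest' ih =>
    intro pre v hvp hvr
    by_cases hvx : v = x
    · subst hvx
      simp only [cands]; rw [if_pos hvp]
      exact List.mem_cons_self
    · have hv' : v ∈ rest' := by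
        rcases List.mem_cons.mp hvr with h | h
        · exact absurd h hvx
        · exact h
      exact List.mem_cons_of_mem _ (ih (x :: pre) v (List.mem_cons_of_mem _ hvp) hv')

theorem mem_cands_dup (a : List Int) : ∀ (rest pre : List Int),
    ¬ rest.Nodup → (0 : Int) ∈ cands a pre rest := by
  intro rest
  induction rest with
  | nil => intro pre h; exact absurd List.nodup_nil h
  | cons x rest' ih =>
    intro pre hnd
    by_cases hx : x ∈ rest'
    · exact List.mem_cons_of_mem _ (mem_cands_zero a rest' (x :: pre) x List.mem_cons_self hx)
    · have h' : ¬ rest'.Nodup := by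
        intro hn; exact hnd (List.nodup_cons.mpr ⟨hx, hn⟩)
      exact List.mem_cons_of_mem _ (ih (x :: pre) h')

theorem cands_cases (a : List Int) : ∀ (rest pre : List Int) (c : Int),
    c ∈ cands a pre rest →
    (c = 0 ∧ ¬ (pre ++ rest).Nodup) ∨ ∃ v ∈ rest, c = gapB a v := by
  intro rest
  induction rest with
  | nil => intro pre c hc; simp [cands] at hc
  | cons x rest' ih =>
    intro pre c hc
    rcases List.mem_cons.mp hc with hc | hc
    · by_cases hx : x ∈ pre
      · rw [if_pos hx] at hc
        left
        refine ⟨hc, fun hnd => ?_⟩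
        exact (List.nodup_append.mp hnd).2.2 x hx x List.mem_cons_self rfl
      · rw [if_neg hx] at hc
        exact Or.inr ⟨x, List.mem_cons_self, hc⟩
    · rcases ih (x :: pre) c hc with ⟨h0, hnd⟩ | ⟨v, hv, he⟩
      · left
        refine ⟨h0, fun hnd' => hnd ?_⟩
        have hperm : ((x :: pre) ++ rest').Perm (pre ++ x :: rest') := by
          simpa using List.perm_middle.symm
        exact hperm.nodup_iff.mpr hnd'
      · exact Or.inr ⟨v, List.mem_cons_of_mem _ hv, he⟩

-- ---- gapB facts ----

theorem gapB_perm {l₁ l₂ : List Int} (h : l₁.Perm l₂) (v : Int) : gapB l₁ v = gapB l₂ v := by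
  have hf : (l₁.filter (fun y => y < v)).Perm (l₂.filter (fun y => y < v)) := h.filter _
  unfold gapB
  by_cases h1 : l₁.filter (fun y => y < v) = []
  · have h2 : l₂.filter (fun y => y < v) = [] := by
      rw [h1] at hf; exact hf.symm.eq_nil
    rw [if_neg (by simp [h1]), if_neg (by simp [h2])]
  · have h2 : l₂.filter (fun y => y < v) ≠ [] := by
      intro h2; rw [h2] at hf; exact h1 hf.eq_nil
    rw [if_pos h1, if_pos h2]
    rcases hm1 : PySem.List.max? (l₁.filter (fun y => y < v)) (fun x => x) with _ | m₁
    · exact absurd ((PySem.List.max?_eq_none_iff _ _).mp hm1) h1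
    rcases hm2 : PySem.List.max? (l₂.filter (fun y => y < v)) (fun x => x) with _ | m₂
    · exact absurd ((PySem.List.max?_eq_none_iff _ _).mp hm2) h2
    have e1 : m₁ ≤ m₂ := PySem.List.max?_isMax hm2 m₁ (hf.mem_iff.mp (PySem.List.max?_mem hm1))
    have e2 : m₂ ≤ m₁ := PySem.List.max?_isMax hm1 m₂ (hf.mem_iff.mpr (PySem.List.max?_mem hm2))
    have : m₁ = m₂ := le_antisymm e1 e2
    rw [this]

theorem filter_lt_head (x : Int) (t : List Int) (h : (x :: t).Pairwise (· ≤ ·)) :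
    (x :: t).filter (fun y => y < x) = [] := by
  rw [List.filter_eq_nil_iff]
  intro y hy
  simp only [decide_eq_true_eq, not_lt]
  rcases List.mem_cons.mp hy with h' | h'
  · omega
  · exact List.rel_of_pairwise_cons h h'

theorem gapB_min (x : Int) (t : List Int) (h : (x :: t).Pairwise (· ≤ ·)) :
    gapB (x :: t) x = x := by
  unfold gapB
  rw [filter_lt_head x t h]
  simp

theorem max_of_bounded (l : List Int) (p : Int) (hne : l ≠ []) (hp : p ∈ l)
    (hub : ∀ y ∈ l, y ≤ p) : PySem.List.max? l (fun x => x) = some p := by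
  rcases hm : PySem.List.max? l (fun x => x) with _ | m
  · exact absurd ((PySem.List.max?_eq_none_iff _ _).mp hm) hne
  · have h1 : m ≤ p := hub m (PySem.List.max?_mem hm)
    have h2 : p ≤ m := PySem.List.max?_isMax hm p hp
    rw [le_antisymm h1 h2]

theorem gapB_mid (u' t' : List Int) (p x : Int)
    (h : ((u' ++ [p]) ++ x :: t').Pairwise (· ≤ ·)) (hpx : p < x) :
    gapB ((u' ++ [p]) ++ x :: t') x = x - p := by
  have hsplit := List.pairwise_append.mp h
  have hub : ∀ y ∈ u' ++ [p], y ≤ p := by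
    intro y hy
    rcases List.mem_append.mp hy with h1 | h1
    · exact (List.pairwise_append.mp hsplit.1).2.2 y h1 p (List.mem_singleton.mpr rfl)
    · simp only [List.mem_singleton] at h1; omega
  have hf : ((u' ++ [p]) ++ x :: t').filter (fun y => y < x) = u' ++ [p] := by
    rw [List.filter_append, filter_lt_head x t' hsplit.2.1, List.append_nil]
    apply List.filter_eq_self.mpr
    intro y hy
    simp only [decide_eq_true_eq]
    exact lt_of_le_of_lt (hub y hy) hpx
  unfold gapB
  rw [hf, max_of_bounded (u' ++ [p]) p (by simp) (by simp) hub]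
  simp

-- ---- gaps over the sorted list ----

theorem aux1 : ∀ (t u : List Int) (p : Int), ((u ++ t).Pairwise (· ≤ ·)) →
    ((u = [] ∧ p = 0) ∨ ∃ u', u = u' ++ [p]) →
    ∀ v ∈ t, v ∉ u → gapB (u ++ t) v ∈ gaps p t := by
  intro t
  induction t with
  | nil => intro u p _ _ v hv; cases hv
  | cons x t' ih =>
    intro u p hpair hdec v hv hvu
    by_cases hvx : v = x
    · subst hvx
      rcases hdec with ⟨hu, hp⟩ | ⟨u', hu⟩
      · subst hu; subst hp
        simp only [List.nil_append] at hpair ⊢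
        rw [gapB_min v t' hpair]
        simp [gaps]
      · subst hu
        have hpmem : p ∈ u' ++ [p] := by simp
        have hle : p ≤ v := (List.pairwise_append.mp hpair).2.2 p hpmem v List.mem_cons_self
        have hne : p ≠ v := fun he => hvu (he ▸ hpmem)
        rw [gapB_mid u' t' p v hpair (by omega)]
        simp [gaps]
    · have hvt' : v ∈ t' := by
        rcases List.mem_cons.mp hv with h | h
        · exact absurd h hvx
        · exact h
      have h2 : ((u ++ [x]) ++ t').Pairwise (· ≤ ·) := by
        simpa [List.append_assoc] using hpair
      have hm := ih (u ++ [x]) x h2 (Or.inr ⟨u, rfl⟩) v hvt'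
        (by simp only [List.mem_append, List.mem_singleton]; tauto)
      rw [List.append_assoc] at hm
      simp only [List.singleton_append] at hm
      exact List.mem_cons_of_mem _ hm

theorem aux2 : ∀ (s : List Int) (p : Int), s.Pairwise (· ≤ ·) → ¬ s.Nodup →
    (0 : Int) ∈ gaps p s := by
  intro s
  induction s with
  | nil => intro p _ h; exact absurd List.nodup_nil h
  | cons x l ih =>
    intro p hpair hnd
    by_cases hx : x ∈ l
    · cases l with
      | nil => cases hx
      | cons y l' =>
        have hxy : x ≤ y := List.rel_of_pairwise_cons hpair List.mem_cons_self
        have hyx : y ≤ x := by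
          rcases List.mem_cons.mp hx with h | h
          · omega
          · exact List.rel_of_pairwise_cons hpair.of_cons h
        simp only [gaps, List.mem_cons]
        right; left; omega
    · have h' : ¬ l.Nodup := by
        intro hn; exact hnd (List.nodup_cons.mpr ⟨hx, hn⟩)
      exact List.mem_cons_of_mem _ (ih x hpair.of_cons h')

theorem aux3 : ∀ (t u : List Int) (p : Int), ((u ++ t).Pairwise (· ≤ ·)) →
    ((u = [] ∧ p = 0) ∨ ∃ u', u = u' ++ [p]) →
    ∀ g ∈ gaps p t, (∃ v ∈ t, g = gapB (u ++ t) v) ∨ (g = 0 ∧ ¬ (u ++ t).Nodup) := by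
  intro t
  induction t with
  | nil => intro u p _ _ g hg; simp [gaps] at hg
  | cons x t' ih =>
    intro u p hpair hdec g hg
    simp only [gaps, List.mem_cons] at hg
    rcases hg with hg | hg
    · rcases hdec with ⟨hu, hp⟩ | ⟨u', hu⟩
      · subst hu; subst hp
        left
        refine ⟨x, List.mem_cons_self, ?_⟩
        simp only [List.nil_append] at hpair ⊢
        rw [gapB_min x t' hpair]
        omega
      · subst hu
        have hle : p ≤ x :=
          (List.pairwise_append.mp hpair).2.2 p (by simp) x List.mem_cons_self
        by_cases hpx : p = x
        · right
          refine ⟨by omega, fun hnd => ?_⟩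
          have hsuf : (p :: x :: t') <:+ (u' ++ [p] ++ x :: t') := by
            have : u' ++ [p] ++ x :: t' = u' ++ (p :: x :: t') := by simp
            rw [this]
            exact List.suffix_append u' (p :: x :: t')
          have hnd2 : (p :: x :: t').Nodup := hnd.sublist hsuf.sublist
          exact (List.nodup_cons.mp hnd2).1 (by simp [hpx])
        · left
          refine ⟨x, List.mem_cons_self, ?_⟩
          rw [gapB_mid u' t' p x hpair (by omega)]
          omega
    · have h2 : ((u ++ [x]) ++ t').Pairwise (· ≤ ·) := by
        simpa [List.append_assoc] using hpair
      rcases ih (u ++ [x]) x h2 (Or.inr ⟨u, rfl⟩) g hg with ⟨v, hv, he⟩ | ⟨h0, hnd⟩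
      · left
        refine ⟨v, List.mem_cons_of_mem _ hv, ?_⟩
        simpa [List.append_assoc] using he
      · right
        refine ⟨h0, fun hnd' => hnd ?_⟩
        simpa [List.append_assoc] using hnd'

-- ===== VERDICT (by name: the statement is the Claim_ definition above) =====
theorem solve_spec : Claim_equal_solve := by
  intro a _ hpre
  have hne : a ≠ [] := hpre
  unfold Spec_solve
  have hperm : (PySem.List.sorted a (fun x => x) false).Perm a :=
    PySem.List.sorted_perm a (fun x => x) false
  have hpair : (PySem.List.sorted a (fun x => x) false).Pairwise (· ≤ ·) := by
    simpa using PySem.List.sorted_pairwise a (fun x => x)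
  have hsne : PySem.List.sorted a (fun x => x) false ≠ [] := by
    rw [Ne, PySem.List.sorted_eq_nil_iff]; exact hne
  rw [solveA_eq a hne, solveB_eq a hne]
  apply lmax_congr
  · rcases hs : PySem.List.sorted a (fun x => x) false with _ | ⟨x, t⟩
    · exact absurd hs hsne
    · simp [gaps]
  · cases a with
    | nil => exact absurd rfl hne
    | cons x t => simp [cands]
  · intro g
    constructor
    · intro hg
      rcases aux3 (PySem.List.sorted a (fun x => x) false) [] 0 (by simpa using hpair)
          (Or.inl ⟨rfl, rfl⟩) g (by simpa using hg) with ⟨v, hv, he⟩ | ⟨h0, hnd⟩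
      · have hva : v ∈ a := hperm.mem_iff.mp hv
        have hge : g = gapB a v := by
          rw [he]
          simpa using gapB_perm hperm v
        rw [hge]
        exact mem_cands_of_mem a a [] v hva (List.not_mem_nil)
      · subst h0
        refine mem_cands_dup a a [] (fun hnd' => hnd ?_)
        simpa using hperm.nodup_iff.mpr hnd'
    · intro hc
      rcases cands_cases a a [] g hc with ⟨h0, hnd⟩ | ⟨v, hv, he⟩
      · subst h0
        exact aux2 _ 0 hpair (fun hnds => hnd (by simpa using hperm.nodup_iff.mp hnds))
      · rw [he, ← gapB_perm hperm v]
        exact aux1 (PySem.List.sorted a (fun x => x) false) [] 0 (by simpa using hpair)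
          (Or.inl ⟨rfl, rfl⟩) v (hperm.mem_iff.mpr hv) (List.not_mem_nil)
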